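-- pv_equiv track=rewrite | github.com/Ksenniya/ai-assistant | entity/chat/workflow/helper_functions.py | comment_out_non_code
-- ===== SOURCE A (Python) =====
-- def comment_out_non_code(text):
--     if '```python' in text:
--         lines = text.splitlines()
--         in_python_block = False
--         commented_lines = []
--
--         for line in lines:
--             if line.strip().startswith("```python"):
--                 # Comment out the ```python line
--                 commented_lines.append(f"# {line}")
--                 in_python_block = True
--             elif line.strip().startswith("```") and in_python_block:
--                 # Comment out the ``` line
--                 commented_lines.append(f"# {line}")
--                 in_python_block = False
--             elif in_python_block:
--                 # Keep lines inside the Python block as-is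
--                 commented_lines.append(line)
--             else:
--                 # Comment out lines outside the Python block
--                 commented_lines.append(f"# {line}")
--
--         return "\n".join(commented_lines)
--     else:
--         return text
-- ===== SOURCE B (Python) =====
-- def _render_group(g):
--     if g and g[0].strip().startswith('```python'):
--         return ['# ' + g[0]] + g[1:]
--     return ['# ' + l for l in g]
--
--
-- def comment_out_non_code(text):
--     if '```python' in text:
--         lines = text.splitlines()
--         groups = []
--         cur = []
--         for line in lines:
--             if line.strip().startswith('```'):
--                 groups.append(cur)
--                 cur = [line]
--             else:
--                 cur.append(line)
--         groups.append(cur)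
--         out = []
--         for g in groups:
--             out.extend(_render_group(g))
--         return '\n'.join(out)
--     return text
-- ===== Notes on version B (the rewrite author's own statement) =====
-- stated objective: alternative
-- what changed: B replaces A's boolean in-block toggle with a group decomposition: it first splits the lines into segments headed by fence lines, then renders each segment at once (a ```python-headed segment keeps its body verbatim, every other segment is fully commented).
import Mathlib
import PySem

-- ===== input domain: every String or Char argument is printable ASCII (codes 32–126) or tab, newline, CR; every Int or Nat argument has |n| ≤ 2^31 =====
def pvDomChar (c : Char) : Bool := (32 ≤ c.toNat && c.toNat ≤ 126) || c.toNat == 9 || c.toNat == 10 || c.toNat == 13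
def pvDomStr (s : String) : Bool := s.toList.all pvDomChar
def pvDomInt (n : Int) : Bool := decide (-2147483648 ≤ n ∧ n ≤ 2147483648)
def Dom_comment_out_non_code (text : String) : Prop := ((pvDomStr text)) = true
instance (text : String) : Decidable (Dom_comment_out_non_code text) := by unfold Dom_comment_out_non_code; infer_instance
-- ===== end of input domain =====

-- B comments the text by fence-headed segments instead of A's running boolean toggle; same cost, different decomposition.

-- ===== PORT A =====
def comment_out_non_code (text : String) : String :=
  if PySem.Str.isIn "```python" text then
    let lines := PySem.Str.splitlines text
    let st := lines.foldl (fun (st : Bool × List String) line =>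
      if PySem.Str.startswith (PySem.Str.strip line) "```python" then
        (true, st.2 ++ ["# " ++ line])
      else if PySem.Str.startswith (PySem.Str.strip line) "```" && st.1 then
        (false, st.2 ++ ["# " ++ line])
      else if st.1 then
        (st.1, st.2 ++ [line])
      else
        (st.1, st.2 ++ ["# " ++ line])) (false, [])
    PySem.Str.join "\n" st.2
  else text

-- ===== PORT B =====
-- helper _render_group of Source B
def renderGroup (g : List String) : List String :=
  match g with
  | [] => List.map (fun l => "# " ++ l) []
  | h :: t =>
    if PySem.Str.startswith (PySem.Str.strip h) "```python" then ("# " ++ h) :: t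
    else (h :: t).map (fun l => "# " ++ l)

def comment_out_non_code_alt (text : String) : String :=
  if PySem.Str.isIn "```python" text then
    let lines := PySem.Str.splitlines text
    let st := lines.foldl (fun (st : List (List String) × List String) line =>
      if PySem.Str.startswith (PySem.Str.strip line) "```" then
        (st.1 ++ [st.2], [line])
      else
        (st.1, st.2 ++ [line])) ([], [])
    let groups := st.1 ++ [st.2]
    PySem.Str.join "\n" (groups.flatMap renderGroup)
  else text

-- ===== PRECONDITION & SPEC =====
def Spec_comment_out_non_code (text : String) (out : String) : Prop := out = comment_out_non_code_alt text
instance (text : String) (out : String) : Decidable (Spec_comment_out_non_code text out) := by unfold Spec_comment_out_non_code; infer_instance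

-- ===== CLAIM (what is proved, stated in full; the proofs are below) =====
def Claim_equal_comment_out_non_code : Prop := ∀ (text : String), Dom_comment_out_non_code text → Spec_comment_out_non_code text (comment_out_non_code text)

-- ===== LEMMAS AND PROOFS =====

def isPyGroup (g : List String) : Bool :=
  match g with
  | [] => false
  | h :: _ => PySem.Str.startswith (PySem.Str.strip h) "```python"

-- a line that opens a python fence is in particular a fence
lemma py_fence_is_fence (l : String) (h : PySem.Str.startswith (PySem.Str.strip l) "```python" = true) :
    PySem.Str.startswith (PySem.Str.strip l) "```" = true := by
  simp only [PySem.Str.startswith_eq] at h ⊢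
  have hpy := (PySem.Chars.startswith_iff _ _).mp h
  exact (PySem.Chars.startswith_iff _ _).mpr
    (List.IsPrefix.trans (by decide : ("```".toList) <+: ("```python".toList)) hpy)

-- rendering an open segment extended by a non-fence line
lemma renderGroup_snoc (cur : List String) (l : String)
    (hl : PySem.Str.startswith (PySem.Str.strip l) "```" = false) :
    renderGroup (cur ++ [l])
      = renderGroup cur ++ [if isPyGroup cur then l else "# " ++ l] := by
  have hlpy : PySem.Str.startswith (PySem.Str.strip l) "```python" = false := by
    cases hpy : PySem.Str.startswith (PySem.Str.strip l) "```python"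
    · rfl
    · rw [py_fence_is_fence l hpy] at hl; exact hl
  cases cur with
  | nil =>
    simp only [List.nil_append, renderGroup, hlpy, Bool.false_eq_true, if_false,
      isPyGroup, List.map_cons, List.map_nil]
  | cons h t =>
    by_cases hp : PySem.Str.startswith (PySem.Str.strip h) "```python" = true
    · simp only [List.cons_append, renderGroup, hp, if_pos, isPyGroup]
    · simp only [List.cons_append, renderGroup, hp, isPyGroup,
        List.map_append, List.map_cons, List.map_nil, Bool.false_eq_true, if_false]

-- rendering a fresh fence-headed segment is a single commented line
lemma renderGroup_fence (l : String) : renderGroup [l] = ["# " ++ l] := by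
  simp only [renderGroup, List.map_cons, List.map_nil]
  split <;> rfl

lemma flatMap_snoc_group (groups : List (List String)) (cur : List String) (l : String) :
    (groups ++ [cur]).flatMap renderGroup ++ renderGroup [l]
      = groups.flatMap renderGroup ++ renderGroup cur ++ renderGroup [l] := by
  simp [List.flatMap_append]

-- main invariant: A's fold accumulator is the rendering of B's groups-so-far plus the open segment
lemma fold_invariant (lines : List String) (flag : Bool) (acc : List String)
    (groups : List (List String)) (cur : List String)
    (hflag : flag = isPyGroup cur)
    (hacc : acc = groups.flatMap renderGroup ++ renderGroup cur) :
    (lines.foldl (fun (st : Bool × List String) line =>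
      if PySem.Str.startswith (PySem.Str.strip line) "```python" then
        (true, st.2 ++ ["# " ++ line])
      else if PySem.Str.startswith (PySem.Str.strip line) "```" && st.1 then
        (false, st.2 ++ ["# " ++ line])
      else if st.1 then
        (st.1, st.2 ++ [line])
      else
        (st.1, st.2 ++ ["# " ++ line])) (flag, acc)).2
    = ((lines.foldl (fun (st : List (List String) × List String) line =>
        if PySem.Str.startswith (PySem.Str.strip line) "```" then
          (st.1 ++ [st.2], [line])
        else
          (st.1, st.2 ++ [line])) (groups, cur)).1
        ++ [(lines.foldl (fun (st : List (List String) × List String) line =>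
        if PySem.Str.startswith (PySem.Str.strip line) "```" then
          (st.1 ++ [st.2], [line])
        else
          (st.1, st.2 ++ [line])) (groups, cur)).2]).flatMap renderGroup := by
  induction lines generalizing flag acc groups cur with
  | nil =>
    simp only [List.foldl_nil, hacc, List.flatMap_append, List.flatMap_cons, List.flatMap_nil,
      List.append_nil]
  | cons l rest ih =>
    simp only [List.foldl_cons]
    by_cases hpy : PySem.Str.startswith (PySem.Str.strip l) "```python" = true
    · have hf := py_fence_is_fence l hpy
      rw [if_pos hpy, if_pos hf]
      refine ih _ _ (groups ++ [cur]) [l] ?_ ?_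
      · simp only [isPyGroup, hpy]
      · rw [hacc, flatMap_snoc_group, renderGroup_fence]
    · have hpyf : PySem.Str.startswith (PySem.Str.strip l) "```python" = false := by
        cases hq : PySem.Str.startswith (PySem.Str.strip l) "```python"
        · rfl
        · exact absurd hq hpy
      by_cases hf : PySem.Str.startswith (PySem.Str.strip l) "```" = true
      · -- plain closing fence: both A-branches (flag true/false) comment it
        rw [if_neg hpy, if_pos hf]
        cases hfl : flag with
        | true =>
          rw [if_pos (by rw [hf, Bool.true_and])]
          refine ih _ _ (groups ++ [cur]) [l] ?_ ?_
          · simp only [isPyGroup, hpyf]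
          · rw [hacc, flatMap_snoc_group, renderGroup_fence]
        | false =>
          simp only [Bool.and_false, Bool.false_eq_true, if_false]
          refine ih _ _ (groups ++ [cur]) [l] ?_ ?_
          · simp only [isPyGroup, hpyf]
          · rw [hacc, flatMap_snoc_group, renderGroup_fence]
      · -- ordinary line: appended to the open segment
        have hff : PySem.Str.startswith (PySem.Str.strip l) "```" = false := by
          cases hq : PySem.Str.startswith (PySem.Str.strip l) "```"
          · rfl
          · exact absurd hq hf
        rw [if_neg hpy, if_neg (by rw [hff, Bool.false_and]; exact Bool.false_ne_true),
          if_neg hf]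
        have hrg := renderGroup_snoc cur l hff
        cases hfl : flag with
        | true =>
          rw [if_pos rfl]
          refine ih _ _ groups (cur ++ [l]) ?_ ?_
          · cases cur with
            | nil => rw [hfl] at hflag; simp only [isPyGroup] at hflag; exact absurd hflag (by simp)
            | cons h t =>
              show (true : Bool) = isPyGroup (h :: t ++ [l])
              simp only [List.cons_append, isPyGroup] at hflag ⊢
              rw [← hflag]; exact hfl.symm
          · rw [hacc, hrg, ← hflag, hfl, if_pos rfl, List.append_assoc]
        | false =>
          simp only [Bool.false_eq_true, if_false]
          refine ih _ _ groups (cur ++ [l]) ?_ ?_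
          · cases cur with
            | nil =>
              show (false : Bool) = isPyGroup ([] ++ [l])
              simp only [List.nil_append, isPyGroup, hpyf]
            | cons h t =>
              show (false : Bool) = isPyGroup (h :: t ++ [l])
              simp only [List.cons_append, isPyGroup] at hflag ⊢
              rw [← hflag]; exact hfl.symm
          · rw [hacc, hrg, ← hflag, hfl, if_neg (by simp), List.append_assoc]

-- ===== VERDICT (by name: the statement is the Claim_ definition above) =====
theorem comment_out_non_code_spec : Claim_equal_comment_out_non_code := by
  intro text _
  unfold Spec_comment_out_non_code comment_out_non_code comment_out_non_code_alt
  cases hb : PySem.Str.isIn "```python" text with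
  | false => rfl
  | true =>
    rw [if_pos rfl, if_pos rfl]
    have := fold_invariant (PySem.Str.splitlines text) false [] [] [] rfl (by simp only [renderGroup, List.flatMap_nil, List.map_nil, List.append_nil])
    exact congrArg (PySem.Str.join "\n") this
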